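-- pv_equiv track=rewrite | github.com/honeybeat1/TIL_algorithm | python-interview/bread-move.py | solution
-- ===== SOURCE A (Python) =====
-- def solution(box):
--   total = box[0]
--   result = [box[0]]
--   for i in range(1, len(box)):
--     total += box[i]
--     tmp = total // (i + 1) + (1 if total % (i + 1) != 0 else 0)
--     result.append(max(result[-1], tmp))
--   return result[-1]
-- ===== SOURCE B (Python) =====
-- def solution(box):
--     def ok(v):
--         # every prefix sum S_i must satisfy S_i <= v*i, i.e. ceil(S_i/i) <= v
--         s = 0
--         for i, x in enumerate(box, 1):
--             s += x
--             if s > v * i: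
--                 return False
--         return True
--     lo, hi = min(box), max(box)
--     while lo < hi:
--         mid = (lo + hi) // 2
--         if ok(mid):
--             hi = mid
--         else:
--             lo = mid + 1
--     return lo
-- ===== Notes on version B (the rewrite author's own statement) =====
-- stated objective: alternative
-- what changed: Replaces A's scan that computes each ceiling-average and tracks a running max by a binary search on the answer value over [min(box), max(box)], using a division-free feasibility test 'every prefix sum S_i <= v*i' with early exit; correct because ceil(S_i/i) <= v iff S_i <= v*i for i > 0, so the least feasible v is exactly A's maximum.
import Mathlib
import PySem

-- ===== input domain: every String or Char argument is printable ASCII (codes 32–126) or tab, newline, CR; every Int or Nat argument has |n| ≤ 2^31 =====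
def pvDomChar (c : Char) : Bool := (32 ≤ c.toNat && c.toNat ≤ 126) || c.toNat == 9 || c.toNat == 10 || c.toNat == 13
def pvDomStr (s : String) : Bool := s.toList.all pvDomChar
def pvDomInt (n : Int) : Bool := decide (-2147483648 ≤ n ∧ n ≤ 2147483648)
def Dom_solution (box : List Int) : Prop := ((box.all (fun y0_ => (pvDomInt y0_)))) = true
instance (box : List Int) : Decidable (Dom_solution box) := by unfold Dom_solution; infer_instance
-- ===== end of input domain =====

-- B replaces A's scan of ceiling-averages with a running max by a binary search on the
-- answer value over [min(box), max(box)] with a division-free prefix-sum feasibility test;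
-- return values proved equal on nonempty input.

-- ===== PORT A =====
-- A's loop body: total += box[i]; tmp = ceil average; result.append(max(result[-1], tmp))
def pvStepA (box : List Int) (st : Int × List Int) (i : Int) : Int × List Int :=
  let total := st.1 + PySem.List.pyGetD box i 0
  let tmp := PySem.Int.floordiv total (i + 1) +
    (if PySem.Int.mod total (i + 1) ≠ 0 then 1 else 0)
  (total, st.2 ++ [max (PySem.List.pyGetD st.2 (-1) 0) tmp])

def solution (box : List Int) : Int :=
  let total0 : Int := PySem.List.pyGetD box 0 0          -- box[0] (IndexError on [] excluded by Pre_)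
  let result0 : List Int := [PySem.List.pyGetD box 0 0]
  let st := (PySem.List.pyRange 1 (box.length : Int) 1).foldl (pvStepA box) (total0, result0)
  PySem.List.pyGetD st.2 (-1) 0                          -- result[-1]

-- ===== PORT B =====
-- ok's loop: running sum over enumerate(box, 1), early return False when s > v*i
def pvOkGo (v : Int) : List (Int × Int) → Int → Bool
  | [], _ => true
  | (i, x) :: rest, s =>
      let s' := s + x
      if s' > v * i then false else pvOkGo v rest s'

def pvOk (box : List Int) (v : Int) : Bool :=
  pvOkGo v (PySem.List.enumerate box 1) 0

-- the while loop: lo, hi converge by halving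
def pvLoop (box : List Int) (lo hi : Int) : Int :=
  if h : lo < hi then
    let mid := PySem.Int.floordiv (lo + hi) 2
    if pvOk box mid then pvLoop box lo mid else pvLoop box (mid + 1) hi
  else lo
termination_by (hi - lo).toNat
decreasing_by
  · have := PySem.Int.floordiv_two_mid_bounds (le_of_lt h)
    have hlt : PySem.Int.floordiv (lo + hi) 2 < hi := by
      rw [PySem.Int.floordiv_eq_ediv_of_pos (by norm_num)] at this ⊢; omega
    omega
  · have := PySem.Int.floordiv_two_mid_bounds (le_of_lt h)
    have _hle : lo ≤ PySem.Int.floordiv (lo + hi) 2 := by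
      rw [PySem.Int.floordiv_eq_ediv_of_pos (by norm_num)] at this ⊢; omega
    omega

def solution_alt (box : List Int) : Int :=
  let lo := (PySem.List.min? box (fun y => y)).getD 0    -- min(box); [] excluded by Pre_
  let hi := (PySem.List.max? box (fun y => y)).getD 0    -- max(box)
  pvLoop box lo hi

-- ===== PRECONDITION & SPEC =====
-- Python A raises IndexError on the empty list (box[0]); excluded.
def Pre_solution (box : List Int) : Prop := box ≠ []
instance (box : List Int) : Decidable (Pre_solution box) := by unfold Pre_solution; infer_instance
def pvWitness_solution : List Int := [3, 1, 2]

def Spec_solution (box : List Int) (out : Int) : Prop := out = solution_alt box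
instance (box : List Int) (out : Int) : Decidable (Spec_solution box out) := by unfold Spec_solution; infer_instance

-- ===== CLAIM (what is proved, stated in full; the proofs are below) =====
def Claim_equal_solution : Prop := ∀ (box : List Int), Dom_solution box → Pre_solution box → Spec_solution box (solution box)

-- ===== LEMMAS AND PROOFS =====

-- prefix sums starting from running total s
def pvPrefsFrom (s : Int) : List Int → List Int
  | [] => []
  | x :: xs => (s + x) :: pvPrefsFrom (s + x) xs

-- s // n + (1 if s % n != 0 else 0) for a pair (n, s): the ceiling average A computes
def pvCeilAvg (p : Int × Int) : Int :=
  PySem.Int.floordiv p.2 p.1 + (if PySem.Int.mod p.2 p.1 ≠ 0 then 1 else 0)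

-- the list of ceiling averages, and its running maximum (the common value)
def pvVlist (box : List Int) : List Int :=
  (PySem.List.enumerate (pvPrefsFrom 0 box) 1).map pvCeilAvg

def pvMx (box : List Int) : Int :=
  match pvVlist box with
  | [] => 0
  | v :: t => t.foldl max v

lemma pvPrefsFrom_append (y : Int) : ∀ (box : List Int) (s : Int),
    pvPrefsFrom s (box ++ [y]) = pvPrefsFrom s box ++ [s + box.sum + y] := by
  intro box
  induction box with
  | nil => intro s; simp [pvPrefsFrom]
  | cons x xs ih =>
      intro s
      simp only [List.cons_append, pvPrefsFrom, ih (s + x), List.sum_cons]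
      congr 3
      ring

lemma pvPrefsFrom_length : ∀ (box : List Int) (s : Int),
    (pvPrefsFrom s box).length = box.length := by
  intro box
  induction box with
  | nil => intro s; simp [pvPrefsFrom]
  | cons x xs ih => intro s; simp [pvPrefsFrom, ih]

lemma pvEnum_append {α : Type} (a : α) : ∀ (l : List α) (s : Int),
    PySem.List.enumerate (l ++ [a]) s = PySem.List.enumerate l s ++ [(s + l.length, a)] := by
  intro l
  induction l with
  | nil => intro s; simp [PySem.List.enumerate_cons, PySem.List.enumerate_nil]
  | cons x xs ih =>
      intro s
      simp only [List.cons_append, PySem.List.enumerate_cons, ih (s + 1), List.length_cons]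
      push_cast
      ring_nf

lemma pvCeilAvg_one (x : Int) : pvCeilAvg (1, x) = x := by
  simp [pvCeilAvg, PySem.Int.floordiv_eq_ediv_of_pos, PySem.Int.mod_eq_emod_of_pos]

lemma pvVlist_append (box : List Int) (y : Int) :
    pvVlist (box ++ [y]) =
      pvVlist box ++ [pvCeilAvg ((box.length : Int) + 1, box.sum + y)] := by
  unfold pvVlist
  rw [pvPrefsFrom_append, pvEnum_append, List.map_append]
  simp [pvPrefsFrom_length]
  ring_nf

lemma pvVlist_cons (b : Int) (bs : List Int) :
    pvVlist (b :: bs) = pvCeilAvg (1, b) :: (PySem.List.enumerate (pvPrefsFrom b bs) 2).map pvCeilAvg := by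
  simp [pvVlist, pvPrefsFrom, PySem.List.enumerate_cons]

lemma pvMx_append (box : List Int) (hne : box ≠ []) (y : Int) :
    pvMx (box ++ [y]) = max (pvMx box) (pvCeilAvg ((box.length : Int) + 1, box.sum + y)) := by
  obtain ⟨b, bs, rfl⟩ : ∃ b bs, box = b :: bs := by
    cases box with
    | nil => exact absurd rfl hne
    | cons b bs => exact ⟨b, bs, rfl⟩
  rw [pvMx, pvMx, pvVlist_append, pvVlist_cons]
  simp [List.foldl_append]

lemma pvGetD_append_left (xs ys : List Int) (i : Int) (h0 : 0 ≤ i) (h : i < (xs.length : Int)) :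
    PySem.List.pyGetD (xs ++ ys) i 0 = PySem.List.pyGetD xs i 0 := by
  rw [PySem.List.pyGetD_eq_getElem (xs ++ ys) 0 h0 (by simp; omega),
      PySem.List.pyGetD_eq_getElem xs 0 h0 h]
  exact List.getElem_append_left (by omega)

lemma pvGetD_append_len (xs : List Int) (y : Int) :
    PySem.List.pyGetD (xs ++ [y]) (xs.length : Int) 0 = y := by
  rw [PySem.List.pyGetD_eq_getElem (xs ++ [y]) 0 (by positivity) (by simp)]
  simp

-- A's fold computes (sum, result) with result ending in pvMx
lemma pvA_run : ∀ (box : List Int), box ≠ [] →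
    ∃ r : List Int,
      (PySem.List.pyRange 1 (box.length : Int) 1).foldl (pvStepA box)
          (PySem.List.pyGetD box 0 0, [PySem.List.pyGetD box 0 0])
        = (box.sum, r ++ [pvMx box]) := by
  intro box
  induction box using List.reverseRecOn with
  | nil => intro h; exact absurd rfl h
  | append_singleton bx y ih =>
      intro _
      cases bx with
      | nil =>
          refine ⟨[], ?_⟩
          simp [PySem.List.pyRange_one_eq_nil (by norm_num : (1:Int) ≤ 1), pvMx, pvVlist,
            pvPrefsFrom, PySem.List.enumerate_cons, pvCeilAvg_one, PySem.List.pyGetD_zero_cons]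
      | cons b bs =>
          obtain ⟨r, hr⟩ := ih (by simp)
          set prev := b :: bs with hprev
          have hlen : ((prev ++ [y]).length : Int) = (prev.length : Int) + 1 := by simp
          have h1n : (1:Int) ≤ (prev.length : Int) := by simp [hprev]
          refine ⟨r ++ [pvMx prev], ?_⟩
          rw [hlen, PySem.List.pyRange_one_succ_right h1n, List.foldl_append]
          have hcongr : (PySem.List.pyRange 1 (prev.length : Int) 1).foldl (pvStepA (prev ++ [y]))
              (PySem.List.pyGetD (prev ++ [y]) 0 0, [PySem.List.pyGetD (prev ++ [y]) 0 0])
              = (prev.sum, r ++ [pvMx prev]) := by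
            have hget0 : PySem.List.pyGetD (prev ++ [y]) 0 0 = PySem.List.pyGetD prev 0 0 :=
              pvGetD_append_left prev [y] 0 le_rfl (by simp [hprev])
            rw [hget0, PySem.List.foldl_congr_mem _ (pvStepA (prev ++ [y])) (pvStepA prev) _ ?_, hr]
            intro acc i hi
            rw [PySem.List.mem_pyRange_one] at hi
            unfold pvStepA
            rw [pvGetD_append_left prev [y] i (by omega) hi.2]
          rw [hcongr]
          simp only [List.foldl_cons, List.foldl_nil, pvStepA, pvGetD_append_len,
            PySem.List.pyGetD_neg_one_append_singleton]
          rw [pvMx_append prev (by simp [hprev]) y]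
          simp [pvCeilAvg]

lemma solution_eq_pvMx (box : List Int) (hne : box ≠ []) : solution box = pvMx box := by
  obtain ⟨r, hr⟩ := pvA_run box hne
  show PySem.List.pyGetD (((PySem.List.pyRange 1 (box.length : Int) 1).foldl (pvStepA box)
      (PySem.List.pyGetD box 0 0, [PySem.List.pyGetD box 0 0])).2) (-1) 0 = pvMx box
  rw [hr]
  simp [PySem.List.pyGetD_neg_one_append_singleton]

-- B side: ceil(S/i) ≤ v ↔ S ≤ v*i (i > 0)
lemma pvCeilAvg_le_iff (i s v : Int) (hi : 0 < i) :
    pvCeilAvg (i, s) ≤ v ↔ s ≤ v * i := by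
  unfold pvCeilAvg
  rw [PySem.Int.floordiv_eq_ediv_of_pos hi, PySem.Int.mod_eq_emod_of_pos hi]
  have hdm := Int.emod_add_mul_ediv s i
  have hr0 : 0 ≤ s % i := Int.emod_nonneg s (by omega)
  have hri : s % i < i := Int.emod_lt_of_pos s hi
  set q := s / i with hq
  set r := s % i with hrdef
  rcases eq_or_ne r 0 with hr | hr
  · rw [if_neg (by simp [hr])]
    constructor
    · intro h
      nlinarith [mul_le_mul_of_nonneg_right h hi.le]
    · intro h
      by_contra hc
      nlinarith [mul_le_mul_of_nonneg_right (show v + 1 ≤ q by omega) hi.le]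
  · rw [if_pos hr]
    constructor
    · intro h
      nlinarith [mul_le_mul_of_nonneg_right h hi.le]
    · intro h
      by_contra hc
      have hr1 : 1 ≤ r := by omega
      nlinarith [mul_le_mul_of_nonneg_right (show v ≤ q by omega) hi.le]

lemma pvOkGo_iff (v : Int) : ∀ (l : List Int) (i s : Int),
    (pvOkGo v (PySem.List.enumerate l i) s = true ↔
      ∀ p ∈ PySem.List.enumerate (pvPrefsFrom s l) i, p.2 ≤ v * p.1) := by
  intro l
  induction l with
  | nil => intro i s; simp [PySem.List.enumerate_nil, pvOkGo, pvPrefsFrom]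
  | cons x xs ih =>
      intro i s
      simp only [PySem.List.enumerate_cons, pvOkGo, pvPrefsFrom]
      by_cases hgt : s + x > v * i
      · simp only [hgt, if_true]
        constructor
        · intro h
          cases h
        · intro hall
          have hthis := hall (i, s + x) (by simp)
          exact ((not_le.mpr hgt) hthis).elim
      · simp only [hgt, if_false, ih (i + 1) (s + x), List.mem_cons]
        constructor
        · intro hall p hp
          rcases hp with hp | hp
          · subst hp; simpa using le_of_not_gt hgt
          · exact hall p hp
        · intro hall p hp
          exact hall p (Or.inr hp)

-- membership in enumerate from 1 has positive index
lemma pvEnum_fst_pos {α : Type} (l : List α) (p : Int × α)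
    (hp : p ∈ PySem.List.enumerate l 1) : 0 < p.1 := by
  rw [PySem.List.mem_enumerate_iff] at hp
  obtain ⟨k, hk, rfl⟩ := hp
  positivity

lemma pvFoldlMax_le_iff (v : Int) : ∀ (t : List Int) (v0 : Int),
    t.foldl max v0 ≤ v ↔ v0 ≤ v ∧ ∀ x ∈ t, x ≤ v := by
  intro t
  induction t with
  | nil => intro v0; simp
  | cons x xs ih =>
      intro v0
      simp only [List.foldl_cons, ih (max v0 x), max_le_iff, List.mem_cons]
      constructor
      · rintro ⟨⟨h1, h2⟩, h3⟩
        exact ⟨h1, fun y hy => hy.elim (fun e => e ▸ h2) (h3 y)⟩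
      · rintro ⟨h1, h2⟩
        exact ⟨⟨h1, h2 x (Or.inl rfl)⟩, fun y hy => h2 y (Or.inr hy)⟩

-- the feasibility test decides "pvMx ≤ v"
lemma pvOk_iff (box : List Int) (hne : box ≠ []) (v : Int) :
    pvOk box v = true ↔ pvMx box ≤ v := by
  obtain ⟨b, bs, rfl⟩ : ∃ b bs, box = b :: bs := by
    cases box with
    | nil => exact absurd rfl hne
    | cons b bs => exact ⟨b, bs, rfl⟩
  rw [pvOk, pvOkGo_iff]
  have hmx : pvMx (b :: bs) ≤ v ↔ ∀ x ∈ pvVlist (b :: bs), x ≤ v := by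
    obtain ⟨w, t, hwt⟩ : ∃ w t, pvVlist (b :: bs) = w :: t :=
      ⟨_, _, pvVlist_cons b bs⟩
    rw [pvMx, hwt, pvFoldlMax_le_iff]
    constructor
    · rintro ⟨h1, h2⟩ x hx
      rcases List.mem_cons.mp hx with rfl | hx
      · exact h1
      · exact h2 x hx
    · intro hmem
      exact ⟨hmem w (by simp), fun x hx => hmem x (by simp [hx])⟩
  rw [hmx]
  unfold pvVlist
  constructor
  · intro h x hx
    rw [List.mem_map] at hx
    obtain ⟨p, hp, rfl⟩ := hx
    have hpos := pvEnum_fst_pos _ p hp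
    rw [show p = (p.1, p.2) from rfl, pvCeilAvg_le_iff p.1 p.2 v hpos]
    exact h p hp
  · intro h p hp
    have hpos := pvEnum_fst_pos _ p hp
    rw [← pvCeilAvg_le_iff p.1 p.2 v hpos]
    exact h (pvCeilAvg p) (List.mem_map.mpr ⟨p, hp, rfl⟩)

-- the binary search converges to pvMx
lemma pvLoop_eq (box : List Int) (hne : box ≠ []) : ∀ (n : Nat) (lo hi : Int),
    (hi - lo).toNat = n → lo ≤ pvMx box → pvMx box ≤ hi → pvLoop box lo hi = pvMx box := by
  intro n
  induction n using Nat.strong_induction_on with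
  | _ n ih =>
      intro lo hi hn hlo hhi
      rw [pvLoop]
      by_cases h : lo < hi
      · simp only [h, dif_pos]
        have hmid := PySem.Int.floordiv_two_mid_bounds (le_of_lt h)
        set mid := PySem.Int.floordiv (lo + hi) 2 with hmiddef
        have hb : lo ≤ mid ∧ mid < hi := by
          rw [hmiddef, PySem.Int.floordiv_eq_ediv_of_pos (by norm_num)]
          rw [hmiddef, PySem.Int.floordiv_eq_ediv_of_pos (by norm_num)] at hmid
          omega
        by_cases hok : pvOk box mid
        · rw [if_pos hok]
          have hle := (pvOk_iff box hne mid).mp hok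
          exact ih (mid - lo).toNat (by omega) lo mid rfl hlo hle
        · rw [if_neg hok]
          have hgt : mid < pvMx box := by
            by_contra hc
            exact hok ((pvOk_iff box hne mid).mpr (by omega))
          exact ih (hi - (mid + 1)).toNat (by omega) (mid + 1) hi rfl (by omega) hhi
      · simp only [h, dif_neg, not_false_iff]
        omega

-- prefix sums are bounded by index * max element
lemma pvPrefs_le_max (mx v : Int) (hv : mx ≤ v) : ∀ (l : List Int) (i s : Int),
    0 < i → s ≤ (i - 1) * v → (∀ x ∈ l, x ≤ mx) →
    ∀ p ∈ PySem.List.enumerate (pvPrefsFrom s l) i, p.2 ≤ v * p.1 := by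
  intro l
  induction l with
  | nil => intro i s _ _ _ p hp; simp [pvPrefsFrom, PySem.List.enumerate_nil] at hp
  | cons x xs ih =>
      intro i s hi hs hb p hp
      simp only [pvPrefsFrom, PySem.List.enumerate_cons, List.mem_cons] at hp
      rcases hp with rfl | hp
      · have hx : x ≤ mx := hb x (List.mem_cons_self)
        simp only []
        nlinarith
      · refine ih (i + 1) (s + x) (by omega) ?_ (fun y hy => hb y (List.mem_cons_of_mem x hy)) p hp
        have hx : x ≤ mx := hb x (List.mem_cons_self)
        nlinarith

-- pvMx lies in [min(box), max(box)]
lemma pvMx_ge_head (b : Int) (bs : List Int) : b ≤ pvMx (b :: bs) := by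
  rw [pvMx, pvVlist_cons, pvCeilAvg_one]
  exact (PySem.List.le_foldl_max _ _).1

lemma pvMx_le_max (box : List Int) (hne : box ≠ []) (mx : Int)
    (hmx : ∀ x ∈ box, x ≤ mx) : pvMx box ≤ mx := by
  rw [← pvOk_iff box hne, pvOk, pvOkGo_iff]
  exact pvPrefs_le_max mx mx le_rfl box 1 0 (by norm_num) (by norm_num) hmx

-- ===== VERDICT (by name: the statement is the Claim_ definition above) =====
theorem solution_spec : Claim_equal_solution := by
  intro box _ hpre
  unfold Spec_solution
  rw [solution_eq_pvMx box hpre]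
  obtain ⟨b, bs, hb⟩ : ∃ b bs, box = b :: bs := by
    cases box with
    | nil => exact absurd rfl hpre
    | cons b bs => exact ⟨b, bs, rfl⟩
  unfold solution_alt
  obtain ⟨mn, hmn⟩ : ∃ m, PySem.List.min? box (fun y => y) = some m := by
    cases h : PySem.List.min? box (fun y => y) with
    | none => exact absurd ((PySem.List.min?_eq_none_iff box (fun y => y)).mp h) hpre
    | some m => exact ⟨m, rfl⟩
  obtain ⟨mx, hmx⟩ : ∃ m, PySem.List.max? box (fun y => y) = some m := by
    cases h : PySem.List.max? box (fun y => y) with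
    | none => exact absurd ((PySem.List.max?_eq_none_iff box (fun y => y)).mp h) hpre
    | some m => exact ⟨m, rfl⟩
  rw [hmn, hmx]
  simp only [Option.getD_some]
  have hlo : mn ≤ pvMx box := by
    have h1 : mn ≤ b := by
      have := PySem.List.min?_isMin hmn b (by rw [hb]; exact List.mem_cons_self)
      simpa using this
    calc mn ≤ b := h1
      _ ≤ pvMx box := by rw [hb]; exact pvMx_ge_head b bs
  have hhi : pvMx box ≤ mx :=
    pvMx_le_max box hpre mx (fun x hx => by simpa using PySem.List.max?_isMax hmx x hx)
  exact (pvLoop_eq box hpre (mx - mn).toNat mn mx rfl hlo hhi).symm
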